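-- pv_equiv track=rewrite | github.com/tunnell/wax | wax/core/math.py | compute_subranges
-- ===== SOURCE A (Python) =====
-- def compute_subranges(peaks, range_around_peak=(-18000, 18000)):
--     """Determine overlapping ranges
--
--     range_around_peak in units of 10 ns
--     18000 means 180 us."""
--     peaks.sort()
--
--     assert len(range_around_peak) == 2
--     assert range_around_peak[0] < range_around_peak[1]
--
--     ranges = []
--
--     for peak in peaks:
--         time_start = peak + range_around_peak[0]
--         time_stop = peak + range_around_peak[1]
--
--         # ranges[-1] is latest range
--         if len(ranges) >= 1 and time_start <= ranges[-1][1]: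
--             ranges[-1][1] = time_stop
--         else:
--             ranges.append([time_start, time_stop])
--
--     return ranges
-- ===== SOURCE B (Python) =====
-- def compute_subranges(peaks, range_around_peak=(-18000, 18000)):
--     """Determine overlapping ranges (divide-and-conquer formulation)."""
--     peaks.sort()
--
--     assert len(range_around_peak) == 2
--     assert range_around_peak[0] < range_around_peak[1]
--
--     lo, hi = range_around_peak
--
--     def solve(seg):
--         # merged intervals of a contiguous segment of the sorted peaks
--         if not seg:
--             return []
--         if len(seg) == 1:
--             return [[seg[0] + lo, seg[0] + hi]]
--         m = len(seg) // 2
--         left = solve(seg[:m])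
--         right = solve(seg[m:])
--         # only the boundary pair can overlap: halves are internally merged
--         if right[0][0] <= left[-1][1]:
--             return left[:-1] + [[left[-1][0], right[0][1]]] + right[1:]
--         return left + right
--
--     return solve(peaks)
-- ===== Notes on version B (the rewrite author's own statement) =====
-- stated objective: alternative
-- what changed: Replaces A's single left-to-right pass that mutates the last emitted interval's endpoint with a divide-and-conquer: recursively compute the merged intervals of each half of the sorted peaks, then join the two interval lists by merging only the boundary pair.
import Mathlib
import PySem

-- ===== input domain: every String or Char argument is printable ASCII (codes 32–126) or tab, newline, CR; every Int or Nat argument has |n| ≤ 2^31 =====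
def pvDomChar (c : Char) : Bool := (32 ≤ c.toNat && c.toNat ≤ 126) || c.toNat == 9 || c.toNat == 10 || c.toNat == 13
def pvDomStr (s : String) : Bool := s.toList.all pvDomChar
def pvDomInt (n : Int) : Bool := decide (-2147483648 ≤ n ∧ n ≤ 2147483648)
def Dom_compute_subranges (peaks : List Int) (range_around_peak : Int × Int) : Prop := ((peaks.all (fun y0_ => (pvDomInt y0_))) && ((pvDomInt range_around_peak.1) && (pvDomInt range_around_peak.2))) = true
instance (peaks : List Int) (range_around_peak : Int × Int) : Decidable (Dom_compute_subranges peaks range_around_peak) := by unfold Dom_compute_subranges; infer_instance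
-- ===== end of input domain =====

-- B replaces A's linear merge-into-last accumulator loop by a divide-and-conquer
-- (solve halves, join at the boundary); same asymptotic cost. Both Pythons sort
-- `peaks` in place — the equivalence proved here is about the RETURN value only.

-- ===== PORT A =====
-- A's for-loop over the sorted peaks, carrying the `ranges` accumulator;
-- `ranges[-1][1]` is read with getLast?/getD (always in range for the lists A builds).
def csLoopA (lo hi : Int) (ps : List Int) (ranges : List (List Int)) : List (List Int) :=
  match ps with
  | [] => ranges
  | p :: rest =>
      let time_start := p + lo
      let time_stop := p + hi
      let ranges' :=
        match ranges.getLast? with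
        | some r =>
            if time_start ≤ r.getD 1 0 then
              ranges.dropLast ++ [[r.getD 0 0, time_stop]]   -- ranges[-1][1] = time_stop
            else ranges ++ [[time_start, time_stop]]
        | none => ranges ++ [[time_start, time_stop]]
      csLoopA lo hi rest ranges'

def compute_subranges (peaks : List Int) (range_around_peak : Int × Int) : List (List Int) :=
  csLoopA range_around_peak.1 range_around_peak.2
    (PySem.List.sorted peaks (fun x => x) false) []

-- ===== PORT B =====
-- Source B's boundary join: `right[0][0] <= left[-1][1]` read with getLast?/getD
-- (both lists are nonempty whenever Source B reaches this point; the fallthrough arm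
-- is unreachable there).
def csMergeLR (L R : List (List Int)) : List (List Int) :=
  match L.getLast?, R with
  | some l, r :: rs =>
      if r.getD 0 0 ≤ l.getD 1 0 then
        L.dropLast ++ [[l.getD 0 0, r.getD 1 0]] ++ rs
      else L ++ R
  | _, _ => L ++ R

-- Source B's recursive solve; seg[:m] / seg[m:] with 0 ≤ m ≤ len(seg) are exactly take/drop.
def csSolveB (lo hi : Int) (seg : List Int) : List (List Int) :=
  match seg with
  | [] => []
  | [x] => [[x + lo, x + hi]]
  | a :: b :: rest =>
      csMergeLR (csSolveB lo hi ((a :: b :: rest).take ((a :: b :: rest).length / 2)))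
                (csSolveB lo hi ((a :: b :: rest).drop ((a :: b :: rest).length / 2)))
termination_by seg.length
decreasing_by all_goals simp [List.length_take, List.length_drop]; omega

def compute_subranges_alt (peaks : List Int) (range_around_peak : Int × Int) : List (List Int) :=
  csSolveB range_around_peak.1 range_around_peak.2
    (PySem.List.sorted peaks (fun x => x) false)

-- ===== PRECONDITION & SPEC =====
-- A's second assert: Pre_ excludes range_around_peak with first ≥ second, where A raises AssertionError.
def Pre_compute_subranges (peaks : List Int) (range_around_peak : Int × Int) : Prop :=
  range_around_peak.1 < range_around_peak.2
instance (peaks : List Int) (range_around_peak : Int × Int) : Decidable (Pre_compute_subranges peaks range_around_peak) := by unfold Pre_compute_subranges; infer_instance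

def pvWitness_compute_subranges : List Int × (Int × Int) := ([5, 1, 30], (-2, 2))

def Spec_compute_subranges (peaks : List Int) (range_around_peak : Int × Int) (out : List (List Int)) : Prop := out = compute_subranges_alt peaks range_around_peak
instance (peaks : List Int) (range_around_peak : Int × Int) (out : List (List Int)) : Decidable (Spec_compute_subranges peaks range_around_peak out) := by unfold Spec_compute_subranges; infer_instance

-- ===== CLAIM (what is proved, stated in full; the proofs are below) =====
def Claim_equal_compute_subranges : Prop := ∀ (peaks : List Int) (range_around_peak : Int × Int), Dom_compute_subranges peaks range_around_peak → Pre_compute_subranges peaks range_around_peak → Spec_compute_subranges peaks range_around_peak (compute_subranges peaks range_around_peak)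

-- ===== LEMMAS AND PROOFS =====

-- Canonical form both ports are reduced to: maximal runs of peaks with gap ≤ hi-lo,
-- kept as (first, last) pairs, then mapped to intervals.
def csRuns (th : Int) (start prev : Int) (ps : List Int) : List (Int × Int) :=
  match ps with
  | [] => [(start, prev)]
  | p :: rest =>
      if p - prev > th then (start, prev) :: csRuns th p p rest
      else csRuns th start p rest

def runsI (lo hi : Int) (l : List Int) : List (List Int) :=
  match l with
  | [] => []
  | p :: rest => (csRuns (hi - lo) p p rest).map (fun se => [se.1 + lo, se.2 + hi])

-- head of csRuns: fst is `start`, and the rest is independent of `start`.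
theorem csRuns_head (th prev : Int) (l : List Int) :
    ∃ b t, ∀ a : Int, csRuns th a prev l = (a, b) :: t := by
  induction l generalizing prev with
  | nil => exact ⟨prev, [], fun a => rfl⟩
  | cons p rest ih =>
      by_cases h : p - prev > th
      · exact ⟨prev, csRuns th p p rest, fun a => by simp [csRuns, h]⟩
      · obtain ⟨b, t, hbt⟩ := ih p
        exact ⟨b, t, fun a => by simp [csRuns, h, hbt a]⟩

theorem csMergeLR_cons (x : List Int) (L R : List (List Int)) (hL : L ≠ []) :
    csMergeLR (x :: L) R = x :: csMergeLR L R := by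
  rcases List.eq_nil_or_concat L with rfl | ⟨L', l, rfl⟩
  · exact absurd rfl hL
  simp only [List.concat_eq_append] at hL
  have h1 : (x :: (L' ++ [l])).getLast? = some l := by
    rw [show x :: (L' ++ [l]) = (x :: L') ++ [l] from by simp, List.getLast?_concat]
  have h2 : (L' ++ [l]).getLast? = some l := List.getLast?_concat ..
  simp only [List.concat_eq_append]
  cases R with
  | nil => unfold csMergeLR; rw [h1, h2]; rfl
  | cons r rs =>
      unfold csMergeLR
      rw [h1, h2]
      split
      · split_ifs <;> simp [List.dropLast_cons_of_ne_nil]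
      · rename_i hcontra
        exact (hcontra l r rs rfl rfl).elim

-- The boundary-join lemma: csRuns over an appended list, mapped to intervals,
-- is the csMergeLR-join of the two halves' interval lists.
theorem runs_append (lo hi : Int) (u : List Int) :
    ∀ (s prev y : Int) (v : List Int),
    ((csRuns (hi - lo) s prev (u ++ y :: v)).map (fun se => [se.1 + lo, se.2 + hi])) =
      csMergeLR ((csRuns (hi - lo) s prev u).map (fun se => [se.1 + lo, se.2 + hi]))
                ((csRuns (hi - lo) y y v).map (fun se => [se.1 + lo, se.2 + hi])) := by
  induction u with
  | nil =>
      intro s prev y v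
      obtain ⟨b, t, hbt⟩ := csRuns_head (hi - lo) y v
      by_cases h : y - prev > hi - lo
      · have hc : ¬ (y + lo ≤ prev + hi) := by omega
        simp [csRuns, h, hbt, csMergeLR, hc]
      · have hc : y + lo ≤ prev + hi := by omega
        simp [csRuns, h, hbt, csMergeLR, hc]
  | cons p u' ih =>
      intro s prev y v
      by_cases h : p - prev > hi - lo
      · obtain ⟨b, t, hbt⟩ := csRuns_head (hi - lo) p u'
        have hne : ((csRuns (hi - lo) p p u').map (fun se => [se.1 + lo, se.2 + hi])) ≠ [] := by
          simp [hbt]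
        simp only [List.cons_append, csRuns, h, if_pos, List.map_cons]
        rw [ih p p y v, csMergeLR_cons _ _ _ hne]
      · simp only [List.cons_append, csRuns, h]
        exact ih s p y v

theorem csSolveB_eq_runsI_aux (lo hi : Int) (n : Nat) :
    ∀ seg : List Int, seg.length ≤ n → csSolveB lo hi seg = runsI lo hi seg := by
  induction n with
  | zero =>
      intro seg hseg
      have : seg = [] := List.eq_nil_of_length_eq_zero (by omega)
      subst this; simp [csSolveB, runsI]
  | succ n ih =>
      intro seg hseg
      match seg with
      | [] => simp [csSolveB, runsI]
      | [x] => simp [csSolveB, runsI, csRuns]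
      | a :: b :: rest =>
          have hlen : (a :: b :: rest).length = rest.length + 2 := by simp
          obtain ⟨m', hm'⟩ : ∃ m', (a :: b :: rest).length / 2 = m' + 1 := by
            refine ⟨(a :: b :: rest).length / 2 - 1, ?_⟩
            omega
          have hd : (a :: b :: rest).drop ((a :: b :: rest).length / 2) ≠ [] := by
            simp [List.drop_eq_nil_iff]
            omega
          obtain ⟨y, v, hyv⟩ := List.exists_cons_of_ne_nil hd
          have htake : (a :: b :: rest).take ((a :: b :: rest).length / 2)
              = a :: (b :: rest).take m' := by rw [hm']; rfl
          have hsplit : (a :: (b :: rest).take m') ++ (y :: v) = a :: b :: rest := by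
            rw [← hyv, ← htake, List.take_append_drop]
          have htail : (b :: rest).take m' ++ y :: v = b :: rest := by
            simpa using hsplit
          have hlt : csSolveB lo hi ((a :: b :: rest).take ((a :: b :: rest).length / 2))
              = runsI lo hi ((a :: b :: rest).take ((a :: b :: rest).length / 2)) := by
            apply ih
            simp [List.length_take]
            omega
          have hld : csSolveB lo hi ((a :: b :: rest).drop ((a :: b :: rest).length / 2))
              = runsI lo hi ((a :: b :: rest).drop ((a :: b :: rest).length / 2)) := by
            apply ih
            simp [List.length_drop]
            omega
          rw [csSolveB, hlt, hld, htake, hyv]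
          simp only [runsI]
          rw [← runs_append lo hi ((b :: rest).take m') a a y v, htail]

theorem csSolveB_eq_runsI (lo hi : Int) (seg : List Int) :
    csSolveB lo hi seg = runsI lo hi seg :=
  csSolveB_eq_runsI_aux lo hi seg.length seg le_rfl

-- Invariant for A's loop (acc already emitted; current open run is (start, prev)).
theorem csLoopA_eq_runs (lo hi : Int) (ps : List Int) :
    ∀ (acc : List (List Int)) (start prev : Int),
    csLoopA lo hi ps (acc ++ [[start + lo, prev + hi]]) =
      acc ++ (csRuns (hi - lo) start prev ps).map (fun se => [se.1 + lo, se.2 + hi]) := by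
  induction ps with
  | nil => intro acc start prev; simp [csLoopA, csRuns]
  | cons p rest ih =>
      intro acc start prev
      by_cases h : p - prev > hi - lo
      · have hgt : ¬ (p + lo ≤ prev + hi) := by omega
        have step : csLoopA lo hi (p :: rest) (acc ++ [[start + lo, prev + hi]]) =
            csLoopA lo hi rest ((acc ++ [[start + lo, prev + hi]]) ++ [[p + lo, p + hi]]) := by
          simp [csLoopA, List.getD, hgt]
        rw [step, ih (acc ++ [[start + lo, prev + hi]]) p p]
        simp [csRuns, h]
      · have hle : p + lo ≤ prev + hi := by omega
        have step : csLoopA lo hi (p :: rest) (acc ++ [[start + lo, prev + hi]]) =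
            csLoopA lo hi rest (acc ++ [[start + lo, p + hi]]) := by
          simp [csLoopA, List.getD, hle]
        rw [step, ih acc start p]
        simp [csRuns, h]

-- ===== VERDICT (by name: the statement is the Claim_ definition above) =====
theorem compute_subranges_spec : Claim_equal_compute_subranges := by
  intro peaks rap _ _
  unfold Spec_compute_subranges compute_subranges compute_subranges_alt
  rw [csSolveB_eq_runsI]
  cases hs : PySem.List.sorted peaks (fun x => x) false with
  | nil => simp [csLoopA, runsI]
  | cons p rest =>
      have := csLoopA_eq_runs rap.1 rap.2 rest [] p p
      simp only [List.nil_append] at this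
      simp [csLoopA, runsI, this]
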